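-- pv_equiv track=rewrite | github.com/lukeliu0415/proj170 | input_generator.py | generate_optimal_graph
-- ===== SOURCE A (Python) =====
-- def generate_optimal_graph(clusters_sizes):
--     result = {}
--     counter = 0
--     for i in range(len(clusters_sizes)):
--         for j in range(clusters_sizes[i]):
--             result[counter] = i
--             counter += 1
--     return result
-- ===== SOURCE B (Python) =====
-- def generate_optimal_graph(clusters_sizes):
--     # Node-centric algorithm: build the prefix-sum boundary list of the cluster
--     # sizes, then each node k independently finds its cluster by binary search
--     # on the boundaries (rightmost insertion point minus 1).
--     prefix = [0]
--     for s in clusters_sizes: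
--         prefix.append(prefix[-1] + (s if s > 0 else 0))
--     result = {}
--     for k in range(prefix[-1]):
--         lo, hi = 0, len(prefix)
--         while lo < hi:
--             mid = (lo + hi) // 2
--             if prefix[mid] <= k:
--                 lo = mid + 1
--             else:
--                 hi = mid
--         result[k] = lo - 1
--     return result
-- ===== Notes on version B (the rewrite author's own statement) =====
-- stated objective: alternative
-- what changed: Replaces A's cluster-by-cluster dict building with a running counter by a node-centric algorithm: build the prefix-sum boundary list of cluster sizes once, then each node k independently finds its cluster by binary search on the boundaries (rightmost insertion point minus 1).
import Mathlib
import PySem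

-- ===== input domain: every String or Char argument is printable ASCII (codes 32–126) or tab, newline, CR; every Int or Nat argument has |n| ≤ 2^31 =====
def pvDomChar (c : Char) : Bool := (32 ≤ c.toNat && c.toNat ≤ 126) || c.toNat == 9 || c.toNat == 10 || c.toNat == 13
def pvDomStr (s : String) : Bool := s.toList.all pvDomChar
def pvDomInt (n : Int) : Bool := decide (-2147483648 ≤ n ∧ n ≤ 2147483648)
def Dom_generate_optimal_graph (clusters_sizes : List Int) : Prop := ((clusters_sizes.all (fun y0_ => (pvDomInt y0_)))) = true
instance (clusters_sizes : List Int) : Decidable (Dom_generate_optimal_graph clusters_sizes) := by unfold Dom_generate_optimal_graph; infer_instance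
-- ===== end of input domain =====

-- B replaces A's cluster-by-cluster dict building with a node-centric algorithm:
-- it first computes the prefix-sum boundary list of the cluster sizes, then each node
-- independently finds its cluster as a rank query (count of boundaries ≤ node index, minus 1).
-- Objective: alternative algorithm (same result, different traversal).

-- ===== PORT A =====
-- literal port of A: dict + counter, outer loop over range(len(cs)), inner loop over range(cs[i]).
-- cs[i] is ported as pyGetD cs i 0: exact, since i ∈ range(len(cs)) is always in range.
def generate_optimal_graph (clusters_sizes : List Int) : List (Int × Int) :=
  (((PySem.List.pyRange 0 (PySem.List.len clusters_sizes) 1).foldl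
    (fun (st : PySem.Dict Int Int × Int) i =>
      (PySem.List.pyRange 0 (PySem.List.pyGetD clusters_sizes i 0) 1).foldl
        (fun st _ => (st.1.insert st.2 i, st.2 + 1)) st)
    (PySem.Dict.empty, 0)).1).items

-- ===== PORT B =====
-- literal port of B: build the prefix boundary list (prefix[-1] via pyGetD _ (-1), always
-- nonempty so exact; prefix[mid] via pyGetD, always in range since 0 <= lo <= mid < hi <= len),
-- then for each node k a hand-rolled binary search (the while loop becomes pvBisect).
def pvBisect (pfx : List Int) (k : Int) (lo hi : Int) : Int :=
  if h : lo < hi then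
    if PySem.List.pyGetD pfx (PySem.Int.floordiv (lo + hi) 2) 0 ≤ k then
      pvBisect pfx k (PySem.Int.floordiv (lo + hi) 2 + 1) hi
    else
      pvBisect pfx k lo (PySem.Int.floordiv (lo + hi) 2)
  else lo
termination_by (hi - lo).toNat
decreasing_by
  · have := PySem.Int.floordiv_two_mid_bounds (le_of_lt h)
    omega
  · have := PySem.Int.floordiv_two_mid_bounds (le_of_lt h)
    have hlt : PySem.Int.floordiv (lo + hi) 2 < hi :=
      (PySem.Int.floordiv_lt_iff_lt_mul (by omega)).2 (by omega)
    omega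

def generate_optimal_graph_alt (clusters_sizes : List Int) : List (Int × Int) :=
  let pfx : List Int := clusters_sizes.foldl
    (fun p s => p ++ [PySem.List.pyGetD p (-1) 0 + (if s > 0 then s else 0)]) [(0 : Int)]
  ((PySem.List.pyRange 0 (PySem.List.pyGetD pfx (-1) 0) 1).foldl
    (fun (d : PySem.Dict Int Int) k =>
      d.insert k (pvBisect pfx k 0 (PySem.List.len pfx) - 1))
    PySem.Dict.empty).items

-- ===== PRECONDITION & SPEC =====
def Spec_generate_optimal_graph (clusters_sizes : List Int) (out : List (Int × Int)) : Prop := out = generate_optimal_graph_alt clusters_sizes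
instance (clusters_sizes : List Int) (out : List (Int × Int)) : Decidable (Spec_generate_optimal_graph clusters_sizes out) := by unfold Spec_generate_optimal_graph; infer_instance

-- ===== CLAIM (what is proved, stated in full; the proofs are below) =====
def Claim_equal_generate_optimal_graph : Prop := ∀ (clusters_sizes : List Int), Dom_generate_optimal_graph clusters_sizes → Spec_generate_optimal_graph clusters_sizes (generate_optimal_graph clusters_sizes)

-- ===== LEMMAS AND PROOFS =====

-- the flat label list both programs describe: cluster index i repeated (size i)⁺ times
def pvLabels (s : Int) : List Int → List Int
  | [] => []
  | c :: cs => (PySem.List.pyRange 0 c 1).map (fun _ => s) ++ pvLabels (s + 1) cs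

-- the tail of B's prefix boundary list, after a running total L
def pvTail (L : Int) : List Int → List Int
  | [] => []
  | c :: cs => (L + (if c > 0 then c else 0)) :: pvTail (L + (if c > 0 then c else 0)) cs

-- total number of nodes
def pvTotal (cs : List Int) : Nat := (cs.map Int.toNat).sum

theorem pv_clamp_eq_toNat (c : Int) : (if c > 0 then c else 0) = (c.toNat : Int) := by
  split_ifs with h <;> omega

theorem pv_labels_length (cs : List Int) : ∀ s : Int, (pvLabels s cs).length = pvTotal cs := by
  induction cs with
  | nil => intro s; simp [pvLabels, pvTotal]
  | cons c cs ih =>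
    intro s
    simp [pvLabels, pvTotal, PySem.List.length_pyRange_one, ih (s + 1)]

-- ===== A side =====

-- inserting at key = length of the enumerated accumulator appends
theorem pv_insert_enum (acc : List Int) (i : Int) :
    (PySem.Dict.mk (PySem.List.enumerate acc 0)).insert (acc.length : Int) i
      = PySem.Dict.mk (PySem.List.enumerate (acc ++ [i]) 0) := by
  apply PySem.Dict.ext
  have hnc : (PySem.Dict.mk (PySem.List.enumerate acc 0)).contains (acc.length : Int) = false := by
    rw [PySem.Dict.contains_mk]
    simp only [List.any_eq_false, beq_iff_eq]
    intro p hp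
    rcases (PySem.List.mem_enumerate_iff _ _ _).1 hp with ⟨k, hk, rfl⟩
    simp only
    omega
  rw [PySem.Dict.items_insert_of_not_contains _ _ hnc, PySem.List.enumerate_append]
  simp [PySem.List.enumerate_cons, PySem.List.enumerate_nil]

-- the inner loop: one insertion per iteration, values all equal to i
theorem pv_inner (i : Int) (l : List Int) : ∀ (acc : List Int),
    l.foldl (fun (st : PySem.Dict Int Int × Int) _ => (st.1.insert st.2 i, st.2 + 1))
      (PySem.Dict.mk (PySem.List.enumerate acc 0), (acc.length : Int))
    = (PySem.Dict.mk (PySem.List.enumerate (acc ++ l.map (fun _ => i)) 0),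
        ((acc ++ l.map (fun _ => i)).length : Int)) := by
  induction l with
  | nil => intro acc; simp
  | cons x l ih =>
    intro acc
    simp only [List.foldl_cons]
    rw [pv_insert_enum acc i]
    have hlen : ((acc.length : Int) + 1) = ((acc ++ [i]).length : Int) := by
      simp
    rw [hlen, ih (acc ++ [i])]
    simp [List.append_assoc]

-- the outer loop over the enumerated sizes
theorem pv_outer (cs : List Int) : ∀ (s : Int) (acc : List Int),
    (PySem.List.enumerate cs s).foldl
      (fun (st : PySem.Dict Int Int × Int) p =>
        (PySem.List.pyRange 0 p.2 1).foldl (fun st _ => (st.1.insert st.2 p.1, st.2 + 1)) st)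
      (PySem.Dict.mk (PySem.List.enumerate acc 0), (acc.length : Int))
    = (PySem.Dict.mk (PySem.List.enumerate (acc ++ pvLabels s cs) 0),
        ((acc ++ pvLabels s cs).length : Int)) := by
  induction cs with
  | nil => intro s acc; simp [PySem.List.enumerate_nil, pvLabels]
  | cons c cs ih =>
    intro s acc
    rw [PySem.List.enumerate_cons]
    simp only [List.foldl_cons, pvLabels]
    rw [pv_inner s (PySem.List.pyRange 0 c 1) acc,
        ih (s + 1) (acc ++ (PySem.List.pyRange 0 c 1).map (fun _ => s))]
    simp [List.append_assoc]

-- A's result is the enumerated label list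
theorem pv_A_eq (cs : List Int) :
    generate_optimal_graph cs = PySem.List.enumerate (pvLabels 0 cs) 0 := by
  unfold generate_optimal_graph
  have h := PySem.List.enumerate_eq_map_pyRange cs 0
  have hb : List.foldl
      (fun (st : PySem.Dict Int Int × Int) p =>
        (PySem.List.pyRange 0 p.2 1).foldl (fun st _ => (st.1.insert st.2 p.1, st.2 + 1)) st)
      (PySem.Dict.empty, 0)
      (List.map (fun j => (j, PySem.List.pyGetD cs j 0)) (PySem.List.pyRange 0 (PySem.List.len cs) 1))
    = List.foldl
      (fun (st : PySem.Dict Int Int × Int) j =>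
        (PySem.List.pyRange 0 (PySem.List.pyGetD cs j 0) 1).foldl (fun st _ => (st.1.insert st.2 j, st.2 + 1)) st)
      (PySem.Dict.empty, 0) (PySem.List.pyRange 0 (PySem.List.len cs) 1) := List.foldl_map
  rw [show (PySem.List.pyRange 0 (PySem.List.len cs) 1 : List Int) = PySem.List.pyRange 0 (PySem.List.len cs) from rfl] at hb
  rw [← hb, ← h]
  have hinit : ((PySem.Dict.empty : PySem.Dict Int Int), (0 : Int))
      = (PySem.Dict.mk (PySem.List.enumerate ([] : List Int) 0), (([] : List Int).length : Int)) := rfl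
  rw [hinit, pv_outer cs 0 []]
  simp

-- ===== B side =====

-- every boundary in pvTail L cs is at least L
theorem pv_tail_ge (cs : List Int) : ∀ (L : Int), ∀ p ∈ pvTail L cs, L ≤ p := by
  induction cs with
  | nil => intro L p hp; simp [pvTail] at hp
  | cons c cs ih =>
    intro L p hp
    simp only [pvTail, List.mem_cons] at hp
    rcases hp with rfl | hp
    · split_ifs <;> omega
    · have := ih (L + (if c > 0 then c else 0)) p hp
      split_ifs at this ⊢ <;> omega

-- the last boundary is L + total size
theorem pv_tail_last (cs : List Int) : ∀ (L : Int),
    (pvTail L cs).getLastD L = L + (pvTotal cs : Int) := by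
  induction cs with
  | nil => intro L; simp [pvTail, pvTotal]
  | cons c cs ih =>
    intro L
    simp only [pvTail, List.getLastD_cons, ih, pvTotal, List.map_cons, List.sum_cons]
    rw [pv_clamp_eq_toNat]
    push_cast
    ring

-- B's prefix-building loop produces 0 :: pvTail 0 cs
theorem pv_prefix_loop (cs : List Int) : ∀ (acc : List Int) (L : Int),
    acc ≠ [] → acc.getLast? = some L →
    cs.foldl (fun p s => p ++ [PySem.List.pyGetD p (-1) 0 + (if s > 0 then s else 0)]) acc
      = acc ++ pvTail L cs := by
  induction cs with
  | nil => intro acc L _ _; simp [pvTail]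
  | cons c cs ih =>
    intro acc L hne hlast
    simp only [List.foldl_cons]
    have hget : PySem.List.pyGetD acc (-1) 0 = L := by
      rw [PySem.List.pyGetD_neg_one acc 0 hne, ← Option.some_inj, ← List.getLast?_eq_some_getLast]
      exact hlast
    rw [hget]
    rw [ih (acc ++ [L + (if c > 0 then c else 0)]) (L + (if c > 0 then c else 0))
        (by simp) (by simp)]
    simp [pvTail, List.append_assoc]

theorem pv_prefix_eq (cs : List Int) :
    cs.foldl (fun p s => p ++ [PySem.List.pyGetD p (-1) 0 + (if s > 0 then s else 0)]) [(0 : Int)]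
      = 0 :: pvTail 0 cs := by
  rw [pv_prefix_loop cs [0] 0 (by simp) (by simp)]
  rfl

-- the key per-node fact: the k-th label equals the rank of k among the boundaries
theorem pv_label_rank (cs : List Int) : ∀ (s L k : Int),
    0 ≤ k → k < (pvTotal cs : Int) →
    PySem.List.pyGetD (pvLabels s cs) k 0
      = s + ((pvTail L cs).countP (fun p => decide (p ≤ L + k)) : Int) := by
  induction cs with
  | nil => intro s L k h0 hk; simp [pvTotal] at hk; omega
  | cons c cs ih =>
    intro s L k h0 hk
    have hm : ((PySem.List.pyRange 0 c 1).map (fun _ => s)).length = c.toNat := by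
      simp [PySem.List.length_pyRange_one]
    have htot : (pvTotal (c :: cs) : Int) = (c.toNat : Int) + (pvTotal cs : Int) := by
      simp [pvTotal]
    simp only [pvLabels, pvTail]
    by_cases hcase : k < (c.toNat : Int)
    · -- node k lies in the first cluster
      have hidx : PySem.List.pyGetD
          ((PySem.List.pyRange 0 c 1).map (fun _ => s) ++ pvLabels (s + 1) cs) k 0 = s := by
        rw [PySem.List.pyGetD_eq_getElem _ _ h0
            (by rw [List.length_append, hm]; push_cast; omega)]
        rw [List.getElem_append_left (by omega : k.toNat < ((PySem.List.pyRange 0 c 1).map (fun _ => s)).length)]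
        simp
      rw [hidx]
      have hhead : ¬ (L + (if c > 0 then c else 0) ≤ L + k) := by
        rw [pv_clamp_eq_toNat]; omega
      have htail : (pvTail (L + (if c > 0 then c else 0)) cs).countP
          (fun p => decide (p ≤ L + k)) = 0 := by
        rw [List.countP_eq_zero]
        intro p hp
        have := pv_tail_ge cs (L + (if c > 0 then c else 0)) p hp
        rw [pv_clamp_eq_toNat] at this
        simp only [decide_eq_true_eq]
        omega
      rw [List.countP_cons_of_neg (by simpa using hhead), htail]
      simp
    · -- node k lies in a later cluster
      have hk' : (c.toNat : Int) ≤ k := by omega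
      have hidx : PySem.List.pyGetD
          ((PySem.List.pyRange 0 c 1).map (fun _ => s) ++ pvLabels (s + 1) cs) k 0
          = PySem.List.pyGetD (pvLabels (s + 1) cs) (k - (c.toNat : Int)) 0 := by
        rw [PySem.List.pyGetD_eq_getElem _ _ h0
            (by rw [List.length_append, hm, pv_labels_length]; rw [htot] at hk; push_cast; omega),
            PySem.List.pyGetD_eq_getElem _ _ (by omega)
            (by rw [pv_labels_length]; rw [htot] at hk; omega)]
        rw [List.getElem_append_right (by rw [hm]; omega)]
        congr 1
        rw [hm]
        omega
      rw [hidx, ih (s + 1) (L + (if c > 0 then c else 0)) (k - (c.toNat : Int))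
          (by omega) (by rw [htot] at hk; omega)]
      have hhead : (L + (if c > 0 then c else 0) ≤ L + k) := by
        rw [pv_clamp_eq_toNat]; omega
      rw [List.countP_cons_of_pos (by simpa using hhead)]
      have harg : L + (if c > 0 then c else 0) + (k - (c.toNat : Int)) = L + k := by
        rw [pv_clamp_eq_toNat]; ring
      rw [harg]
      push_cast
      ring

-- the boundary list is nondecreasing
theorem pv_tail_pairwise (cs : List Int) : ∀ L : Int, (pvTail L cs).Pairwise (· ≤ ·) := by
  induction cs with
  | nil => intro L; simp [pvTail]
  | cons c cs ih =>
    intro L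
    simp only [pvTail, List.pairwise_cons]
    exact ⟨fun b hb => pv_tail_ge cs _ b hb, ih _⟩

-- a predicate true exactly on the first n positions is counted n times
theorem pv_countP_boundary (p : Int → Bool) : ∀ (l : List Int) (n : Nat), n ≤ l.length →
    (∀ i (h : i < l.length), i < n → p l[i] = true) →
    (∀ i (h : i < l.length), n ≤ i → p l[i] = false) →
    l.countP p = n := by
  intro l
  induction l with
  | nil => intro n hn _ _; simp at hn; simp [hn]
  | cons a t ih =>
    intro n hn hlow hhigh
    cases n with
    | zero =>
      rw [List.countP_eq_zero]
      intro x hx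
      rcases List.mem_iff_getElem.1 hx with ⟨i, hi, rfl⟩
      simp [hhigh i hi (Nat.zero_le i)]
    | succ m =>
      rw [List.countP_cons_of_pos (by simpa using hlow 0 (by simp) (Nat.succ_pos m)),
          ih m (by simpa using hn)
            (fun i h hi => by simpa using hlow (i + 1) (by simpa using h) (by omega))
            (fun i h hi => by simpa using hhigh (i + 1) (by simpa using h) (by omega))]

-- the binary search returns the number of boundaries ≤ k
theorem pv_bisect_count (pfx : List Int) (k : Int) (hsort : pfx.Pairwise (· ≤ ·)) :
    ∀ (n : Nat) (lo hi : Int), (hi - lo).toNat ≤ n →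
    0 ≤ lo → lo ≤ hi → hi ≤ (pfx.length : Int) →
    (∀ i (h : i < pfx.length), (i : Int) < lo → pfx[i] ≤ k) →
    (∀ i (h : i < pfx.length), hi ≤ (i : Int) → k < pfx[i]) →
    pvBisect pfx k lo hi = (pfx.countP (fun p => decide (p ≤ k)) : Int) := by
  intro n
  induction n with
  | zero =>
    intro lo hi hfuel h0 hlh hhl hlow hhigh
    have heq : lo = hi := by omega
    rw [pvBisect, dif_neg (by omega)]
    rw [pv_countP_boundary _ pfx lo.toNat (by omega)
      (fun i h hi => by simpa using hlow i h (by omega))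
      (fun i h hi => by simp; exact hhigh i h (by omega))]
    omega
  | succ m ih =>
    intro lo hi hfuel h0 hlh hhl hlow hhigh
    rw [pvBisect]
    by_cases h : lo < hi
    · rw [dif_pos h]
      have hmid := PySem.Int.floordiv_two_mid_bounds (le_of_lt h)
      have hmidlt : PySem.Int.floordiv (lo + hi) 2 < hi :=
        (PySem.Int.floordiv_lt_iff_lt_mul (by omega)).2 (by omega)
      set mid := PySem.Int.floordiv (lo + hi) 2 with hmiddef
      have hmrange : mid.toNat < pfx.length := by omega
      have hget : PySem.List.pyGetD pfx mid 0 = pfx[mid.toNat] :=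
        PySem.List.pyGetD_eq_getElem _ _ (by omega) (by omega)
      have hpw := List.pairwise_iff_getElem.1 hsort
      by_cases hc : PySem.List.pyGetD pfx mid 0 ≤ k
      · rw [if_pos hc]
        refine ih (mid + 1) hi (by omega) (by omega) (by omega) hhl ?_ hhigh
        intro i hilen hi
        have : pfx[i] ≤ pfx[mid.toNat] := by
          rcases Nat.lt_or_ge i mid.toNat with hlt | hge
          · exact hpw i mid.toNat hilen hmrange hlt
          · have : i = mid.toNat := by omega
            subst this; exact le_refl _
        calc pfx[i] ≤ pfx[mid.toNat] := this
          _ ≤ k := by rw [← hget]; exact hc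
      · rw [if_neg hc]
        rw [not_le, hget] at hc
        refine ih lo mid (by omega) h0 (by omega) (by omega) hlow ?_
        intro i hilen hi
        have hgemid : pfx[mid.toNat] ≤ pfx[i] := by
          rcases Nat.lt_or_ge mid.toNat i with hlt | hge
          · exact hpw mid.toNat i hmrange hilen hlt
          · have : i = mid.toNat := by omega
            subst this; exact le_refl _
        omega
    · rw [dif_neg h]
      have heq : lo = hi := by omega
      rw [pv_countP_boundary _ pfx lo.toNat (by omega)
        (fun i hh hi => by simpa using hlow i hh (by omega))
        (fun i hh hi => by simp; exact hhigh i hh (by omega))]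
      omega

-- B's result is also the enumerated label list
theorem pv_B_eq (cs : List Int) :
    generate_optimal_graph_alt cs = PySem.List.enumerate (pvLabels 0 cs) 0 := by
  unfold generate_optimal_graph_alt
  simp only [pv_prefix_eq]
  have hlast : PySem.List.pyGetD (0 :: pvTail 0 cs) (-1) 0 = (pvTotal cs : Int) := by
    rw [PySem.List.pyGetD_neg_one _ 0 (by simp), ← Option.some_inj, ← List.getLast?_eq_some_getLast,
        List.getLast?_cons, ← List.getLastD_eq_getLast?]
    rw [pv_tail_last cs 0]
    simp
  rw [hlast]
  -- the dict-comprehension loop over distinct fresh keys appends its pairs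
  rw [PySem.Dict.items_foldl_insert_fresh (PySem.List.pyRange 0 (pvTotal cs : Int) 1)
      (fun k => k)
      (fun k => pvBisect (0 :: pvTail 0 cs) k 0 (PySem.List.len (0 :: pvTail 0 cs)) - 1)
      PySem.Dict.empty (by simp [PySem.Dict.contains_empty])
      (by simpa using PySem.List.nodup_pyRange_one 0 ((pvTotal cs : Int)))]
  rw [show (PySem.Dict.empty : PySem.Dict Int Int).items = [] from rfl, List.nil_append]
  rw [PySem.List.enumerate_eq_map_pyRange (pvLabels 0 cs) 0]
  rw [show PySem.List.len (pvLabels 0 cs) = (pvTotal cs : Int) by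
    simp [PySem.List.len_eq, pv_labels_length]]
  rw [show PySem.List.pyRange 0 ((pvTotal cs : Int)) = PySem.List.pyRange 0 ((pvTotal cs : Int)) 1 from rfl]
  apply List.map_congr_left
  intro j hj
  rcases (PySem.List.mem_pyRange_one).1 hj with ⟨hj0, hjlt⟩
  have hsort : (0 :: pvTail 0 cs).Pairwise (· ≤ ·) := by
    rw [List.pairwise_cons]
    exact ⟨fun b hb => pv_tail_ge cs 0 b hb, pv_tail_pairwise cs 0⟩
  have hbis := pv_bisect_count (0 :: pvTail 0 cs) j hsort
    (((PySem.List.len (0 :: pvTail 0 cs)) - 0).toNat) 0 (PySem.List.len (0 :: pvTail 0 cs))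
    (le_refl _) (le_refl _) (by simp only [PySem.List.len_eq]; omega)
    (by simp only [PySem.List.len_eq]; omega)
    (by intro i h hi; omega)
    (by intro i h hi; simp only [PySem.List.len_eq] at hi; omega)
  rw [hbis]
  rw [List.countP_cons_of_pos (by simpa using hj0)]
  rw [pv_label_rank cs 0 0 j hj0 hjlt]
  push_cast
  ring_nf

-- ===== VERDICT (by name: the statement is the Claim_ definition above) =====
theorem generate_optimal_graph_spec : Claim_equal_generate_optimal_graph := by
  intro cs _
  show generate_optimal_graph cs = generate_optimal_graph_alt cs
  rw [pv_A_eq, pv_B_eq]
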